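-- pv_equiv track=rewrite | github.com/davioliveiraes/facul-EngenhariaDeSoftware | Disciplina-EstruturaDeDados/busca_binaria_condicional.py | busca_binario_condicional
-- ===== SOURCE A (Python) =====
-- def busca_binario_condicional(lista, alvo, restricao):
--    inicio, fim = 0, len(lista) - 1
--    resultado = -1
--
--    while inicio <= fim:
--       meio = (inicio + fim) // 2
--       if lista[meio] > alvo and lista[meio] % restricao == 0:
--          resultado = lista[meio]
--          fim = meio - 1
--       elif lista[meio] <= alvo:
--          inicio = meio + 1
--       else:
--          fim = meio - 1
--    return resultado
-- ===== SOURCE B (Python) =====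
-- def busca_binario_condicional(lista, alvo, restricao):
--     # Stage 1: record the probe trace of a plain binary search against alvo.
--     # (In A, both v>alvo branches move fim left, so the traversal never needs
--     # the divisibility test.)
--     trace = []
--     inicio, fim = 0, len(lista) - 1
--     while inicio <= fim:
--         meio = (inicio + fim) // 2
--         v = lista[meio]
--         trace.append(v)
--         if v <= alvo:
--             inicio = meio + 1
--         else:
--             fim = meio - 1
--     # Stage 2: the answer is the last qualifying probed value, i.e. the first
--     # one scanning the trace backwards.
--     return next((v for v in reversed(trace) if v > alvo and v % restricao == 0), -1)
-- ===== Notes on version B (the rewrite author's own statement) =====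
-- stated objective: alternative
-- what changed: Splits A's single loop with a mutable accumulator into two stages: a plain binary-search pass that only compares against alvo and records the probe trace (the divisibility test never influences A's traversal direction), then a backward scan of that trace for the first value > alvo divisible by restricao.
-- outside the precondition, e.g. on busca_binario_condicional([5, 0, 0], 3, 0): A returns -1, B returns -1
import Mathlib
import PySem

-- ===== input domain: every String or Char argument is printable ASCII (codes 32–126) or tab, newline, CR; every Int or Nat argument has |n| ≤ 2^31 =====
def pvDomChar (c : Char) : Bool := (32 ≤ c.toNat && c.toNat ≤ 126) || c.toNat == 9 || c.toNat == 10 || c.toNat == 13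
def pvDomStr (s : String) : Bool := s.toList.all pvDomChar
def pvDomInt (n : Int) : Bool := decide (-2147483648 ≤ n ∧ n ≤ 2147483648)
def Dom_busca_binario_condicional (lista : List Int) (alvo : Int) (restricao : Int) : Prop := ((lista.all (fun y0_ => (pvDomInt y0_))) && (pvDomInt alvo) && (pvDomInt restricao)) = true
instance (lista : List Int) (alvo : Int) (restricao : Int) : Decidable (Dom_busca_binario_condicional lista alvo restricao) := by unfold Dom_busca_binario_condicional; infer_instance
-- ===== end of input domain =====

-- B replaces A's single loop with a mutable accumulator by two stages: a plain
-- binary-search pass recording the probe trace, then a backward scan of the trace.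

-- ===== PORT A =====
-- A's while-loop over the state (inicio, fim, resultado). The Nat fuel only makes the
-- recursion structural: every iteration shrinks the interval [inicio, fim] by at least
-- one, so fuel = lista.length + 1 is never exhausted, and probed indices are always in
-- range, so the .getD 0 default is unreachable.
def buscaLoopA (lista : List Int) (alvo : Int) (restricao : Int)
    (fuel : Nat) (inicio fim resultado : Int) : Int :=
  match fuel with
  | 0 => resultado
  | fuel + 1 =>
    if inicio ≤ fim then
      let meio := PySem.Int.floordiv (inicio + fim) 2
      let v := (PySem.List.pyGet? lista meio).getD 0
      if v > alvo ∧ PySem.Int.mod v restricao = 0 then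
        buscaLoopA lista alvo restricao fuel inicio (meio - 1) v
      else if v ≤ alvo then
        buscaLoopA lista alvo restricao fuel (meio + 1) fim resultado
      else
        buscaLoopA lista alvo restricao fuel inicio (meio - 1) resultado
    else resultado

def busca_binario_condicional (lista : List Int) (alvo : Int) (restricao : Int) : Int :=
  buscaLoopA lista alvo restricao (lista.length + 1) 0 ((lista.length : Int) - 1) (-1)

-- ===== PORT B =====
-- Stage 1 of B: the probe trace of a plain binary search against alvo (no restricao).
def traceProbes (lista : List Int) (alvo : Int) (fuel : Nat) (inicio fim : Int) : List Int :=
  match fuel with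
  | 0 => []
  | fuel + 1 =>
    if inicio ≤ fim then
      let meio := PySem.Int.floordiv (inicio + fim) 2
      let v := (PySem.List.pyGet? lista meio).getD 0
      if v ≤ alvo then
        v :: traceProbes lista alvo fuel (meio + 1) fim
      else
        v :: traceProbes lista alvo fuel inicio (meio - 1)
    else []

-- Stage 2 of B: first element of the (reversed) trace that is > alvo and divisible.
def firstQualifying (alvo restricao : Int) : List Int → Int
  | [] => -1
  | v :: t =>
    if v > alvo ∧ PySem.Int.mod v restricao = 0 then v
    else firstQualifying alvo restricao t

def busca_binario_condicional_alt (lista : List Int) (alvo : Int) (restricao : Int) : Int :=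
  firstQualifying alvo restricao
    (traceProbes lista alvo (lista.length + 1) 0 ((lista.length : Int) - 1)).reverse

-- ===== PRECONDITION & SPEC =====
-- Pre_ excludes restricao = 0, on which Python A raises ZeroDivisionError whenever the
-- search probes an element greater than alvo (on a few restricao = 0 inputs whose probed
-- elements are all ≤ alvo, A still returns -1, and B agrees there).
def Pre_busca_binario_condicional (lista : List Int) (alvo : Int) (restricao : Int) : Prop :=
  restricao ≠ 0
instance (lista : List Int) (alvo : Int) (restricao : Int) : Decidable (Pre_busca_binario_condicional lista alvo restricao) := by unfold Pre_busca_binario_condicional; infer_instance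

def pvWitness_busca_binario_condicional : List Int × Int × Int := ([1, 4, 6, 9], 3, 2)

def Spec_busca_binario_condicional (lista : List Int) (alvo : Int) (restricao : Int) (out : Int) : Prop := out = busca_binario_condicional_alt lista alvo restricao
instance (lista : List Int) (alvo : Int) (restricao : Int) (out : Int) : Decidable (Spec_busca_binario_condicional lista alvo restricao out) := by unfold Spec_busca_binario_condicional; infer_instance

-- ===== CLAIM (what is proved, stated in full; the proofs are below) =====
def Claim_equal_busca_binario_condicional : Prop := ∀ (lista : List Int) (alvo : Int) (restricao : Int), Dom_busca_binario_condicional lista alvo restricao → Pre_busca_binario_condicional lista alvo restricao → Spec_busca_binario_condicional lista alvo restricao (busca_binario_condicional lista alvo restricao)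

-- ===== LEMMAS AND PROOFS =====
-- Proof-side: a generalized backward scan starting from accumulator r.
def firstQD (alvo restricao r : Int) : List Int → Int
  | [] => r
  | v :: t =>
    if v > alvo ∧ PySem.Int.mod v restricao = 0 then v
    else firstQD alvo restricao r t

theorem firstQD_neg_one (alvo restricao : Int) (l : List Int) :
    firstQD alvo restricao (-1) l = firstQualifying alvo restricao l := by
  induction l with
  | nil => rfl
  | cons v t ih => rw [firstQD, firstQualifying, ih]

-- Appending v at the end of the scan only changes the default accumulator.
theorem firstQD_append (alvo restricao r v : Int) (xs : List Int) :
    firstQD alvo restricao r (xs ++ [v]) =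
      firstQD alvo restricao
        (if v > alvo ∧ PySem.Int.mod v restricao = 0 then v else r) xs := by
  induction xs with
  | nil => simp only [List.nil_append, firstQD]
  | cons x t ih => simp only [List.cons_append, firstQD, ih]

-- A's loop at any fuel/state equals the backward scan of the probe trace, seeded with
-- A's current accumulator.
theorem loopA_eq_scan (lista : List Int) (alvo : Int) (restricao : Int)
    (fuel : Nat) (inicio fim resultado : Int) :
    buscaLoopA lista alvo restricao fuel inicio fim resultado =
      firstQD alvo restricao resultado
        (traceProbes lista alvo fuel inicio fim).reverse := by
  induction fuel generalizing inicio fim resultado with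
  | zero => rfl
  | succ fuel ih =>
      rw [buscaLoopA, traceProbes]
      by_cases h : inicio ≤ fim
      · rw [if_pos h, if_pos h]
        set meio := PySem.Int.floordiv (inicio + fim) 2 with hmeio
        set v := (PySem.List.pyGet? lista meio).getD 0 with hv
        by_cases hc : v > alvo ∧ PySem.Int.mod v restricao = 0
        · have hle : ¬ v ≤ alvo := by omega
          rw [if_pos hc, if_neg hle, ih, List.reverse_cons]
          rw [firstQD_append, if_pos hc]
        · rw [if_neg hc]
          by_cases hle : v ≤ alvo
          · rw [if_pos hle, if_pos hle, ih, List.reverse_cons]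
            rw [firstQD_append, if_neg hc]
          · rw [if_neg hle, if_neg hle, ih, List.reverse_cons]
            rw [firstQD_append, if_neg hc]
      · rw [if_neg h, if_neg h]
        rfl

-- ===== VERDICT (by name: the statement is the Claim_ definition above) =====
theorem busca_binario_condicional_spec : Claim_equal_busca_binario_condicional := by
  intro lista alvo restricao _ hpre
  by_cases h0 : restricao = 0
  · exact absurd h0 hpre
  unfold Spec_busca_binario_condicional busca_binario_condicional busca_binario_condicional_alt
  rw [loopA_eq_scan, firstQD_neg_one]
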